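-- pv_equiv track=rewrite | github.com/siyue-zhang/SynTableQA | classifier.py | separate_cols
-- ===== SOURCE A (Python) =====
-- def separate_cols(cols):
--     # cols = ['1_id', '2_agg', '3_constituency', '4_constituency_number', '5_region', '6_name', '7_name_first', '8_name_second', '9_party', '10_last_elected', '11_last_elected_number']
--     cols = ['_'.join(col.split('_')[1:]) for col in cols[2:]]
--     original_cols = []
--     processed_cols = []
--
--     for i in range(len(cols)):
--         if i==0:
--             current = cols[i]
--             current_ = 'c1'
--             count = 1
--             original_cols.append(current_)
--         else:
--             if current in cols[i]:
--                 processed_cols.append(cols[i].replace(current, current_))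
--             else:
--                 current = cols[i]
--                 count += 1
--                 current_ = f'c{count}'
--                 original_cols.append(current_)
--
--     return original_cols, processed_cols
-- ===== SOURCE B (Python) =====
-- def separate_cols(cols):
--     # Two-pass decomposition: first build the group structure (leader, members),
--     # then render labels and replaced member names from it.
--     names = ['_'.join(c.split('_')[1:]) for c in cols[2:]]
--     groups = []
--     leader = None
--     members = []
--     for name in names:
--         if leader is not None and leader in name:
--             members.append(name)
--         else:
--             if leader is not None:
--                 groups.append((leader, members))
--             leader = name
--             members = []
--     if leader is not None:
--         groups.append((leader, members))
--     original_cols = ['c' + str(i) for i in range(1, len(groups) + 1)]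
--     processed_cols = [m.replace(l, 'c' + str(i))
--                       for i, (l, ms) in enumerate(groups, 1) for m in ms]
--     return original_cols, processed_cols
-- ===== Notes on version B (the rewrite author's own statement) =====
-- stated objective: alternative
-- what changed: B replaces A's single stateful loop (which assigns labels and emits replaced names on the fly) by a two-pass decomposition: first build an explicit list of (leader, members) groups, then render the label list and the replaced member names from that structure.
import Mathlib
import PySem

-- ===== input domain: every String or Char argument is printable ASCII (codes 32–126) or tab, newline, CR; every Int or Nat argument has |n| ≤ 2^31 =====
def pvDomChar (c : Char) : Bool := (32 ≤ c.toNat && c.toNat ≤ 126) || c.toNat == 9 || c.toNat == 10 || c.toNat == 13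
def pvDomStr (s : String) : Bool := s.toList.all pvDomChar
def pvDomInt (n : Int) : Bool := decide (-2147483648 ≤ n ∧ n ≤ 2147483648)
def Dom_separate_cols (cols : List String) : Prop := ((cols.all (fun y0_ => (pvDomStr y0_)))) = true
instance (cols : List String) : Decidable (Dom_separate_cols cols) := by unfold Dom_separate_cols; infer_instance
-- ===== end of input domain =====

-- B replaces A's single stateful label-assigning loop by a two-pass decomposition:
-- build the (leader, members) group structure first, then render labels and
-- replaced names from it (objective: alternative decomposition, same cost).

-- ===== PORT A =====
-- '_'.join(col.split('_')[1:]); split? is always `some` for the nonempty separator "_"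
def pvStrip (col : String) : String :=
  PySem.Str.join "_" (PySem.List.slice ((PySem.Str.split? col "_").getD []) (some 1) none)

-- one iteration of A's loop; state = (current, current_, count, original, processed)
def sepA_step (s : String × String × Int × List String × List String)
    (p : Int × String) : String × String × Int × List String × List String :=
  let (current, current_, count, original, processed) := s
  if p.1 == 0 then
    (p.2, "c1", 1, original ++ ["c1"], processed)
  else if PySem.Str.isIn current p.2 then
    (current, current_, count, original,
      processed ++ [PySem.Str.replace p.2 current current_])
  else
    (p.2, "c" ++ PySem.Int.toStr (count + 1), count + 1,
      original ++ ["c" ++ PySem.Int.toStr (count + 1)], processed)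

def separate_cols (cols : List String) : List String × List String :=
  let cols2 := (PySem.List.slice cols (some 2) none).map pvStrip
  let st := (PySem.List.enumerate cols2 0).foldl sepA_step ("", "", 0, [], [])
  (st.2.2.2.1, st.2.2.2.2)

-- ===== PORT B =====
-- one iteration of B's grouping loop; state = (leader, members, groups)
def sepB_step (s : Option String × List String × List (String × List String))
    (name : String) : Option String × List String × List (String × List String) :=
  match s with
  | (some L, members, groups) =>
    if PySem.Str.isIn L name then (some L, members ++ [name], groups)
    else (some name, [], groups ++ [(L, members)])
  | (none, _, groups) => (some name, [], groups)

def separate_cols_alt (cols : List String) : List String × List String :=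
  let names := (PySem.List.slice cols (some 2) none).map pvStrip
  let st := names.foldl sepB_step (none, [], [])
  let groups :=
    match st.1 with
    | some L => st.2.2 ++ [(L, st.2.1)]
    | none => st.2.2
  let original_cols :=
    (PySem.List.pyRange 1 ((groups.length : Int) + 1) 1).map
      (fun i => "c" ++ PySem.Int.toStr i)
  let processed_cols :=
    (PySem.List.enumerate groups 1).flatMap
      (fun p => p.2.2.map (fun m => PySem.Str.replace m p.2.1 ("c" ++ PySem.Int.toStr p.1)))
  (original_cols, processed_cols)

-- ===== PRECONDITION & SPEC =====
def Spec_separate_cols (cols : List String) (out : List String × List String) : Prop := out = separate_cols_alt cols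
instance (cols : List String) (out : List String × List String) : Decidable (Spec_separate_cols cols out) := by unfold Spec_separate_cols; infer_instance

-- ===== CLAIM (what is proved, stated in full; the proofs are below) =====
def Claim_equal_separate_cols : Prop := ∀ (cols : List String), Dom_separate_cols cols → Spec_separate_cols cols (separate_cols cols)

-- ===== LEMMAS AND PROOFS =====

-- proof-side: the final group list both loops compute
def gRun : List String → String → List String → List (String × List String) → List (String × List String)
  | [], L, ms, gs => gs ++ [(L, ms)]
  | z :: rest, L, ms, gs =>
    if PySem.Str.isIn L z then gRun rest L (ms ++ [z]) gs
    else gRun rest z [] (gs ++ [(L, ms)])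

-- the two ports' result as a function of the preprocessed name list (defeq to the ports' bodies)
def AOut (names : List String) : List String × List String :=
  (((PySem.List.enumerate names 0).foldl sepA_step ("", "", 0, [], [])).2.2.2.1,
   ((PySem.List.enumerate names 0).foldl sepA_step ("", "", 0, [], [])).2.2.2.2)

def BOut (names : List String) : List String × List String :=
  ((PySem.List.pyRange 1 (((match (names.foldl sepB_step (none, [], [])).1 with
      | some L => (names.foldl sepB_step (none, [], [])).2.2 ++ [(L, (names.foldl sepB_step (none, [], [])).2.1)]
      | none => (names.foldl sepB_step (none, [], [])).2.2).length : Int) + 1) 1).map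
      (fun i => "c" ++ PySem.Int.toStr i),
   (PySem.List.enumerate (match (names.foldl sepB_step (none, [], [])).1 with
      | some L => (names.foldl sepB_step (none, [], [])).2.2 ++ [(L, (names.foldl sepB_step (none, [], [])).2.1)]
      | none => (names.foldl sepB_step (none, [], [])).2.2) 1).flatMap
      (fun p => p.2.2.map (fun m => PySem.Str.replace m p.2.1 ("c" ++ PySem.Int.toStr p.1))))

-- proof-side renderings of the two output lists from a group list
def origOf (n : Nat) : List String :=
  (PySem.List.pyRange 1 ((n : Int) + 1) 1).map (fun i => "c" ++ PySem.Int.toStr i)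

def procOf (gl : List (String × List String)) : List String :=
  (PySem.List.enumerate gl 1).flatMap
    (fun p => p.2.2.map (fun m => PySem.Str.replace m p.2.1 ("c" ++ PySem.Int.toStr p.1)))

lemma origOf_eq_range (n : Nat) :
    origOf n = (List.range n).map (fun k : Nat => "c" ++ PySem.Int.toStr ((k : Int) + 1)) := by
  unfold origOf
  rw [PySem.List.pyRange_one, show ((n : Int) + 1 - 1).toNat = n from by omega, List.map_map]
  exact List.map_congr_left (fun a _ => by simp only [Function.comp_apply]; rw [Int.add_comm])

lemma origOf_succ (n : Nat) :
    origOf (n + 1) = origOf n ++ ["c" ++ PySem.Int.toStr ((n : Int) + 1)] := by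
  rw [origOf_eq_range, origOf_eq_range, List.range_succ]
  simp

lemma procOf_append (gl : List (String × List String)) (L : String) (ms : List String) :
    procOf (gl ++ [(L, ms)]) =
      procOf gl ++ ms.map (fun m => PySem.Str.replace m L ("c" ++ PySem.Int.toStr ((gl.length : Int) + 1))) := by
  simp [procOf, PySem.List.enumerate_append, Int.add_comm]

lemma B_loop (rest : List String) : ∀ (L : String) (ms : List String) (gs : List (String × List String)),
    (match (rest.foldl sepB_step (some L, ms, gs)).1 with
     | some L' => (rest.foldl sepB_step (some L, ms, gs)).2.2 ++ [(L', (rest.foldl sepB_step (some L, ms, gs)).2.1)]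
     | none => (rest.foldl sepB_step (some L, ms, gs)).2.2) = gRun rest L ms gs := by
  induction rest with
  | nil => intro L ms gs; simp [gRun]
  | cons z rest ih =>
      intro L ms gs
      rw [List.foldl_cons, gRun]
      by_cases h : PySem.Str.isIn L z = true
      · rw [show sepB_step (some L, ms, gs) z = (some L, ms ++ [z], gs) by
          simp only [sepB_step]; rw [if_pos h], if_pos h]
        exact ih L (ms ++ [z]) gs
      · rw [show sepB_step (some L, ms, gs) z = (some z, [], gs ++ [(L, ms)]) by
          simp only [sepB_step]; rw [if_neg h], if_neg h]
        exact ih z [] (gs ++ [(L, ms)])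

lemma A_loop (rest : List String) : ∀ (k : Int), 1 ≤ k →
    ∀ (L : String) (ms : List String) (gs : List (String × List String)),
    (let st := (PySem.List.enumerate rest k).foldl sepA_step
        (L, "c" ++ PySem.Int.toStr ((gs.length : Int) + 1), (gs.length : Int) + 1,
          origOf (gs.length + 1), procOf (gs ++ [(L, ms)]))
     (st.2.2.2.1, st.2.2.2.2))
    = (origOf (gRun rest L ms gs).length, procOf (gRun rest L ms gs)) := by
  induction rest with
  | nil => intro k hk L ms gs; simp [gRun, PySem.List.enumerate]
  | cons z rest ih =>
      intro k hk L ms gs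
      have hk0 : (k == 0) = false := by simp; omega
      rw [PySem.List.enumerate_cons, List.foldl_cons, gRun]
      by_cases h : PySem.Str.isIn L z = true
      · have hstep : sepA_step
            (L, "c" ++ PySem.Int.toStr ((gs.length : Int) + 1), (gs.length : Int) + 1,
              origOf (gs.length + 1), procOf (gs ++ [(L, ms)])) (k, z)
            = (L, "c" ++ PySem.Int.toStr ((gs.length : Int) + 1), (gs.length : Int) + 1,
              origOf (gs.length + 1), procOf (gs ++ [(L, ms ++ [z])])) := by
          simp only [sepA_step, hk0, Bool.false_eq_true, if_false]
          rw [if_pos h, procOf_append, procOf_append]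
          simp
        rw [hstep, if_pos h]
        exact ih (k + 1) (by omega) L (ms ++ [z]) gs
      · have hlen : (((gs ++ [(L, ms)]).length : Nat) : Int) = (gs.length : Int) + 1 := by simp
        have hlenN : (gs ++ [(L, ms)]).length = gs.length + 1 := by simp
        have hstep : sepA_step
            (L, "c" ++ PySem.Int.toStr ((gs.length : Int) + 1), (gs.length : Int) + 1,
              origOf (gs.length + 1), procOf (gs ++ [(L, ms)])) (k, z)
            = (z, "c" ++ PySem.Int.toStr ((((gs ++ [(L, ms)]).length : Nat) : Int) + 1),
              (((gs ++ [(L, ms)]).length : Nat) : Int) + 1,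
              origOf ((gs ++ [(L, ms)]).length + 1), procOf ((gs ++ [(L, ms)]) ++ [(z, [])])) := by
          simp only [sepA_step, hk0, Bool.false_eq_true, if_false]
          rw [if_neg h]
          simp only [Prod.mk.injEq, true_and]
          refine ⟨?_, ?_, ?_, ?_⟩
          · rw [hlen]
          · rw [hlen]
          · conv_rhs => rw [hlenN, origOf_succ]
            push_cast
            rfl
          · conv_rhs => rw [procOf_append]
            simp
        rw [hstep, if_neg h]
        exact ih (k + 1) (by omega) z [] (gs ++ [(L, ms)])

lemma core_eq (names : List String) : AOut names = BOut names := by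
  cases names with
  | nil =>
      simp [AOut, BOut, PySem.List.enumerate]
  | cons y rest =>
      have hA0 : sepA_step ("", "", 0, [], []) ((0 : Int), y)
          = (y, "c" ++ PySem.Int.toStr (((([] : List (String × List String)).length : Nat) : Int) + 1),
            (((([] : List (String × List String)).length : Nat) : Int) + 1,
            origOf (([] : List (String × List String)).length + 1),
            procOf (([] : List (String × List String)) ++ [(y, [])]))) := by
        have e2 : origOf (0 + 1) = ["c1"] := by decide
        simp only [sepA_step]
        norm_num [e2]
        exact ⟨by decide, by simp [procOf, PySem.List.enumerate]⟩
      have hA := A_loop rest (0 + 1) (by omega) y [] []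
      simp only at hA
      have hB := B_loop rest y [] []
      unfold AOut BOut
      rw [PySem.List.enumerate_cons, List.foldl_cons, hA0,
        List.foldl_cons, show sepB_step (none, [], []) y = (some y, [], []) from rfl, hB]
      rw [Prod.ext_iff] at hA
      exact Prod.ext hA.1 hA.2

theorem main_eq (cols : List String) : separate_cols cols = separate_cols_alt cols :=
  core_eq ((PySem.List.slice cols (some 2) none).map pvStrip)

-- ===== VERDICT (by name: the statement is the Claim_ definition above) =====
theorem separate_cols_spec : Claim_equal_separate_cols := by
  intro cols _
  unfold Spec_separate_cols
  exact main_eq cols
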